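-- pv_equiv track=rewrite | github.com/jschaub30/viz_workload | scripts/parse_pcie.py | parse_header
-- ===== SOURCE A (Python) =====
-- def parse_header(line):
--     '''
--     Find columns for each data type
--     '''
--     line.pop(0)  # good timestamp
--     line.pop(0)  # bad timestamp
--     util_htod = [i for i, x in enumerate(line) if x.startswith('H')
--                  and 'util' in x]
--     util_dtoh = [i for i, x in enumerate(line) if x.startswith('D')
--                  and 'util' in x]
--     size_htod = [i for i, x in enumerate(line) if x.startswith('H')
--                  and 'size' in x]
--     size_dtoh = [i for i, x in enumerate(line) if x.startswith('D')
--                  and 'size' in x]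
--     return (util_htod, util_dtoh, size_htod, size_dtoh)
-- ===== SOURCE B (Python) =====
-- def parse_header(line):
--     '''
--     Find columns for each data type
--     '''
--     line.pop(0)  # good timestamp
--     line.pop(0)  # bad timestamp
--     util_htod, util_dtoh, size_htod, size_dtoh = [], [], [], []
--     for i, x in enumerate(line):
--         if x.startswith('H'):
--             if 'util' in x:
--                 util_htod.append(i)
--             if 'size' in x:
--                 size_htod.append(i)
--         elif x.startswith('D'):
--             if 'util' in x:
--                 util_dtoh.append(i)
--             if 'size' in x:
--                 size_dtoh.append(i)
--     return (util_htod, util_dtoh, size_htod, size_dtoh)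
-- ===== Notes on version B (the rewrite author's own statement) =====
-- stated objective: simpler
-- what changed: Replaces A's four separate enumerate scans (one comprehension per category) by one single pass over the line that dispatches each column index into the right list, using that a column cannot start with both 'H' and 'D'.
import Mathlib
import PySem

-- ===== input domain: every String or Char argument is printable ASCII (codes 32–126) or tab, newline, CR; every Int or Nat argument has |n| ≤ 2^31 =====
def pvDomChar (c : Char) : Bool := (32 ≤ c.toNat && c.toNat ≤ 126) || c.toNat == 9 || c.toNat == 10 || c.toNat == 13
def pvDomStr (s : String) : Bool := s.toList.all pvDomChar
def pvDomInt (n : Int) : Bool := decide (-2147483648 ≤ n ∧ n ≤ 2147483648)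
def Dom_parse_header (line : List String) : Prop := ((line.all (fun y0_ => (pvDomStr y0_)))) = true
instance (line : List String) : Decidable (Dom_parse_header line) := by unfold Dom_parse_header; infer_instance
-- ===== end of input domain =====

-- B collapses A's four enumerate scans into one single pass (objective: simpler).
-- Both A and B mutate `line` in place (two pops); the equivalence proved is about the return value.

-- ===== PORT A =====
def parse_header (line : List String) : List Int × List Int × List Int × List Int :=
  match PySem.List.pop? line 0 with
  | none => ([], [], [], [])          -- Python raises IndexError here; outside Pre_
  | some (_, l1) =>
    match PySem.List.pop? l1 0 with
    | none => ([], [], [], [])        -- Python raises IndexError here; outside Pre_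
    | some (_, l2) =>
      let util_htod := (PySem.List.enumerate l2).filterMap
        (fun p => if PySem.Str.startswith p.2 "H" && PySem.Str.isIn "util" p.2 then some p.1 else none)
      let util_dtoh := (PySem.List.enumerate l2).filterMap
        (fun p => if PySem.Str.startswith p.2 "D" && PySem.Str.isIn "util" p.2 then some p.1 else none)
      let size_htod := (PySem.List.enumerate l2).filterMap
        (fun p => if PySem.Str.startswith p.2 "H" && PySem.Str.isIn "size" p.2 then some p.1 else none)
      let size_dtoh := (PySem.List.enumerate l2).filterMap
        (fun p => if PySem.Str.startswith p.2 "D" && PySem.Str.isIn "size" p.2 then some p.1 else none)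
      (util_htod, util_dtoh, size_htod, size_dtoh)

-- ===== PORT B =====
-- one step of B's single loop body
def pvStep (acc : List Int × List Int × List Int × List Int) (p : Int × String) :
    List Int × List Int × List Int × List Int :=
  let (uh, ud, sh, sd) := acc
  if PySem.Str.startswith p.2 "H" then
    let uh := if PySem.Str.isIn "util" p.2 then uh ++ [p.1] else uh
    let sh := if PySem.Str.isIn "size" p.2 then sh ++ [p.1] else sh
    (uh, ud, sh, sd)
  else if PySem.Str.startswith p.2 "D" then
    let ud := if PySem.Str.isIn "util" p.2 then ud ++ [p.1] else ud
    let sd := if PySem.Str.isIn "size" p.2 then sd ++ [p.1] else sd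
    (uh, ud, sh, sd)
  else (uh, ud, sh, sd)

def parse_header_alt (line : List String) : List Int × List Int × List Int × List Int :=
  match line with
  | _ :: _ :: rest => (PySem.List.enumerate rest).foldl pvStep ([], [], [], [])
  | _ => ([], [], [], [])             -- Python raises IndexError here; outside Pre_

-- ===== PRECONDITION & SPEC =====
-- Pre_ excludes lines with fewer than two entries, on which both A and B raise IndexError (line.pop(0)).
def Pre_parse_header (line : List String) : Prop := 2 ≤ line.length
instance (line : List String) : Decidable (Pre_parse_header line) := by
  unfold Pre_parse_header; infer_instance

def pvWitness_parse_header : List String :=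
  ["ts", "ts", "Htod util (%)", "Dtoh util (%)", "Htod size", "Dtoh size", "other"]

def Spec_parse_header (line : List String) (out : List Int × List Int × List Int × List Int) : Prop := out = parse_header_alt line
instance (line : List String) (out : List Int × List Int × List Int × List Int) : Decidable (Spec_parse_header line out) := by unfold Spec_parse_header; infer_instance

-- ===== CLAIM (what is proved, stated in full; the proofs are below) =====
def Claim_equal_parse_header : Prop := ∀ (line : List String), Dom_parse_header line → Pre_parse_header line → Spec_parse_header line (parse_header line)

-- ===== LEMMAS AND PROOFS =====

-- a string cannot start with both 'D' and 'H'
lemma not_startswith_H_of_D (x : String) (h : PySem.Str.startswith x "D" = true) :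
    PySem.Str.startswith x "H" = false := by
  by_contra hH
  rw [Bool.not_eq_false] at hH
  rw [PySem.Str.startswith_eq, PySem.Chars.startswith_iff] at h hH
  rcases h with ⟨t, ht⟩
  rcases hH with ⟨u, hu⟩
  have h2 := hu.trans ht.symm
  simp at h2

-- pvStep written as four independent conditional appends
lemma pvStep_eq (acc : List Int × List Int × List Int × List Int) (p : Int × String) :
    pvStep acc p =
      (acc.1 ++ (if PySem.Str.startswith p.2 "H" && PySem.Str.isIn "util" p.2 then [p.1] else []),
       acc.2.1 ++ (if PySem.Str.startswith p.2 "D" && PySem.Str.isIn "util" p.2 then [p.1] else []),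
       acc.2.2.1 ++ (if PySem.Str.startswith p.2 "H" && PySem.Str.isIn "size" p.2 then [p.1] else []),
       acc.2.2.2 ++ (if PySem.Str.startswith p.2 "D" && PySem.Str.isIn "size" p.2 then [p.1] else [])) := by
  obtain ⟨uh, ud, sh, sd⟩ := acc
  unfold pvStep
  by_cases hH : PySem.Str.startswith p.2 "H" = true
  · have hD : PySem.Str.startswith p.2 "D" = false := by
      by_contra hD'
      rw [Bool.not_eq_false] at hD'
      rw [not_startswith_H_of_D _ hD'] at hH
      exact Bool.false_ne_true hH
    by_cases hu : PySem.Str.isIn "util" p.2 = true <;>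
      by_cases hs : PySem.Str.isIn "size" p.2 = true <;>
        simp only [hH, hD, hu, hs, Bool.true_and, Bool.false_and, if_true, if_false,
          List.append_nil, Bool.false_eq_true]
  · rw [Bool.not_eq_true] at hH
    by_cases hD : PySem.Str.startswith p.2 "D" = true
    · by_cases hu : PySem.Str.isIn "util" p.2 = true <;>
        by_cases hs : PySem.Str.isIn "size" p.2 = true <;>
          simp only [hH, hD, hu, hs, Bool.true_and, Bool.false_and, if_true, if_false,
            List.append_nil, Bool.false_eq_true]
    · rw [Bool.not_eq_true] at hD
      simp only [hH, hD, Bool.false_and, if_false, List.append_nil, Bool.false_eq_true]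

lemma filterMap_cons_if {α β : Type} (f : α → Option β) (p : α) (l : List α) (c : Bool) (y : β)
    (h : f p = if c then some y else none) :
    List.filterMap f (p :: l) = (if c then [y] else []) ++ List.filterMap f l := by
  cases c <;> simp [h]

lemma fold_spec (l : List (Int × String)) (uh ud sh sd : List Int) :
    l.foldl pvStep (uh, ud, sh, sd) =
      (uh ++ l.filterMap (fun p => if PySem.Str.startswith p.2 "H" && PySem.Str.isIn "util" p.2 then some p.1 else none),
       ud ++ l.filterMap (fun p => if PySem.Str.startswith p.2 "D" && PySem.Str.isIn "util" p.2 then some p.1 else none),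
       sh ++ l.filterMap (fun p => if PySem.Str.startswith p.2 "H" && PySem.Str.isIn "size" p.2 then some p.1 else none),
       sd ++ l.filterMap (fun p => if PySem.Str.startswith p.2 "D" && PySem.Str.isIn "size" p.2 then some p.1 else none)) := by
  induction l generalizing uh ud sh sd with
  | nil => simp
  | cons p l ih =>
    rw [List.foldl_cons, pvStep_eq, ih,
      filterMap_cons_if (fun q => if PySem.Str.startswith q.2 "H" && PySem.Str.isIn "util" q.2 then some q.1 else none) p l _ p.1 rfl,
      filterMap_cons_if (fun q => if PySem.Str.startswith q.2 "D" && PySem.Str.isIn "util" q.2 then some q.1 else none) p l _ p.1 rfl,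
      filterMap_cons_if (fun q => if PySem.Str.startswith q.2 "H" && PySem.Str.isIn "size" q.2 then some q.1 else none) p l _ p.1 rfl,
      filterMap_cons_if (fun q => if PySem.Str.startswith q.2 "D" && PySem.Str.isIn "size" q.2 then some q.1 else none) p l _ p.1 rfl]
    simp [List.append_assoc]

-- ===== VERDICT (by name: the statement is the Claim_ definition above) =====
theorem parse_header_spec : Claim_equal_parse_header := by
  intro line _ hpre
  unfold Spec_parse_header
  match line, hpre with
  | a :: b :: rest, _ =>
    show parse_header (a :: b :: rest) = parse_header_alt (a :: b :: rest)
    simp only [parse_header, parse_header_alt, PySem.List.pop?_zero_cons]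
    rw [fold_spec]
    simp only [List.nil_append]
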